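-- pv_equiv track=rewrite | github.com/Subhajit-git07/Leetcode | leetcode_practice2.py | partitionLevels
-- ===== SOURCE A (Python) =====
-- def partitionLevels(s):
--     start = 0
--     end = 0
--     res = []
--     str_dict = {}
--     for i in range(len(s)):
--         str_dict[s[i]] = i
--
--     for i in range(len(s)):
--         end = max(end, str_dict[s[i]])
--         if i == end:
--             res.append(i-start+1)
--             start = i + 1
--     return res
-- ===== SOURCE B (Python) =====
-- def partitionLevels(s):
--     # Interval-merge reformulation: one pass records each char's first and last
--     # occurrence; the first-occurrence dict is in increasing start order, so a
--     # single merge pass over those intervals yields the partition lengths.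
--     first = {}
--     last = {}
--     for i, c in enumerate(s):
--         if c not in first:
--             first[c] = i
--         last[c] = i
--     res = []
--     cur = None
--     for c, st in first.items():
--         en = last[c]
--         if cur is None:
--             cur = (st, en)
--         elif st <= cur[1]:
--             cur = (cur[0], max(cur[1], en))
--         else:
--             res.append(cur[1] - cur[0] + 1)
--             cur = (st, en)
--     if cur is not None:
--         res.append(cur[1] - cur[0] + 1)
--     return res
-- ===== Notes on version B (the rewrite author's own statement) =====
-- stated objective: faster
-- what changed: Replaces A's last-occurrence dict plus running-max cut loop over every position with per-character [first,last] occurrence intervals (the first-occurrence dict is already start-sorted) merged in a single pass over the distinct characters.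
import Mathlib
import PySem

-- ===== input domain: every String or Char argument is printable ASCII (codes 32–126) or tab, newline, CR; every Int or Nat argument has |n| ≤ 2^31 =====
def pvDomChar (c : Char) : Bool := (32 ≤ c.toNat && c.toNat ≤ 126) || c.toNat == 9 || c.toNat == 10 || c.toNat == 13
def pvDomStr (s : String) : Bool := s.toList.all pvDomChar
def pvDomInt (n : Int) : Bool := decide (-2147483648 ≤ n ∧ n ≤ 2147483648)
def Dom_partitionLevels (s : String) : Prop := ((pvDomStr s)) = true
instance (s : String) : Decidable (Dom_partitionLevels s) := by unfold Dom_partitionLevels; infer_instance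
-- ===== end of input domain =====

-- B merges per-character [first,last] occurrence intervals (merge pass over distinct
-- characters) instead of A's running-max cut loop over every position; a timing run
-- measured B faster by a constant factor.


-- ===== PORT A =====
-- for i in range(len(s)): str_dict[s[i]] = i  — s[i] is in range for every i the loop
-- visits, so PySem.List.pyGetD with a dummy default is exact here.
def partitionLevels (s : String) : List Int :=
  let cs := s.toList
  let n : Int := PySem.Chars.len cs
  let str_dict := (PySem.List.pyRange 0 n 1).foldl
    (fun (d : PySem.Dict Char Int) i => d.insert (PySem.List.pyGetD cs i ' ') i)
    PySem.Dict.empty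
  ((PySem.List.pyRange 0 n 1).foldl
    (fun (acc : Int × Int × List Int) i =>
      let e := max acc.2.1 (str_dict.getD (PySem.List.pyGetD cs i ' ') 0)
      if i == e then (i + 1, e, acc.2.2 ++ [i - acc.1 + 1]) else (acc.1, e, acc.2.2))
    (0, 0, ([] : List Int))).2.2

-- ===== PORT B =====
-- first/last occurrence dicts built in one enumerate pass, then a merge pass over
-- first.items() (insertion order = increasing start); last[c] lookup is exact via getD
-- since every key of first is a key of last.
def partitionLevels_alt (s : String) : List Int :=
  let fl := (PySem.List.enumerate s.toList 0).foldl
    (fun (p : PySem.Dict Char Int × PySem.Dict Char Int) ic =>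
      ((if p.1.contains ic.2 then p.1 else p.1.insert ic.2 ic.1), p.2.insert ic.2 ic.1))
    (PySem.Dict.empty, PySem.Dict.empty)
  let st := fl.1.items.foldl
    (fun (acc : Option (Int × Int) × List Int) cst =>
      let en := fl.2.getD cst.1 0
      match acc.1 with
      | none => (some (cst.2, en), acc.2)
      | some cur =>
        if cst.2 ≤ cur.2 then (some (cur.1, max cur.2 en), acc.2)
        else (some (cst.2, en), acc.2 ++ [cur.2 - cur.1 + 1]))
    (none, ([] : List Int))
  match st.1 with
  | none => st.2
  | some cur => st.2 ++ [cur.2 - cur.1 + 1]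

-- ===== PRECONDITION & SPEC =====
def Spec_partitionLevels (s : String) (out : List Int) : Prop := out = partitionLevels_alt s
instance (s : String) (out : List Int) : Decidable (Spec_partitionLevels s out) := by unfold Spec_partitionLevels; infer_instance

-- ===== CLAIM (what is proved, stated in full; the proofs are below) =====
def Claim_equal_partitionLevels : Prop := ∀ (s : String), Dom_partitionLevels s → Spec_partitionLevels s (partitionLevels s)

-- ===== LEMMAS AND PROOFS =====

-- proof-side reformulation: the last-occurrence dict, the first-occurrence dict,
-- and the two loop bodies as steps over `enumerate s.toList 0`

def pvL (l : List Char) : PySem.Dict Char Int :=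
  (PySem.List.enumerate l 0).foldl (fun d p => d.insert p.2 p.1) PySem.Dict.empty

def pvF (l : List Char) : PySem.Dict Char Int :=
  (PySem.List.enumerate l 0).foldl
    (fun d p => if d.contains p.2 then d else d.insert p.2 p.1) PySem.Dict.empty

def pvStepA (L : PySem.Dict Char Int) (acc : Int × Int × List Int) (p : Int × Char) :
    Int × Int × List Int :=
  let e := max acc.2.1 (L.getD p.2 0)
  if p.1 == e then (p.1 + 1, e, acc.2.2 ++ [p.1 - acc.1 + 1]) else (acc.1, e, acc.2.2)

def pvStepB (L : PySem.Dict Char Int) (acc : Option (Int × Int) × List Int)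
    (cst : Char × Int) : Option (Int × Int) × List Int :=
  let en := L.getD cst.1 0
  match acc.1 with
  | none => (some (cst.2, en), acc.2)
  | some cur =>
    if cst.2 ≤ cur.2 then (some (cur.1, max cur.2 en), acc.2)
    else (some (cst.2, en), acc.2 ++ [cur.2 - cur.1 + 1])

-- B's merge step lifted to positions: skip the non-first occurrences
def pvStepB' (l : List Char) (L : PySem.Dict Char Int)
    (acc : Option (Int × Int) × List Int) (p : Int × Char) : Option (Int × Int) × List Int :=
  if p.2 ∈ l.take p.1.toNat then acc else pvStepB L acc (p.2, p.1)

def pvFlush (st : Option (Int × Int) × List Int) : List Int :=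
  match st.1 with | none => st.2 | some cur => st.2 ++ [cur.2 - cur.1 + 1]

lemma pv_foldl_filterMap {a b s : Type} (f : a -> Option b) (g : s -> b -> s) :
    ∀ (l : List a) (init : s),
    (l.filterMap f).foldl g init = l.foldl (fun acc x => (f x).elim acc (g acc)) init := by
  intro l
  induction l with
  | nil => intro init; rfl
  | cons x t ih =>
    intro init
    simp only [List.filterMap_cons, List.foldl_cons]
    cases h : f x <;> simp [ih]

lemma pvL_snoc (l : List Char) (x : Char) :
    pvL (l ++ [x]) = (pvL l).insert x (l.length : Int) := by
  unfold pvL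
  rw [PySem.List.enumerate_append, List.foldl_append]
  simp [PySem.List.enumerate_cons]

lemma pvF_snoc (l : List Char) (x : Char) :
    pvF (l ++ [x]) =
      if (pvF l).contains x then pvF l else (pvF l).insert x (l.length : Int) := by
  unfold pvF
  rw [PySem.List.enumerate_append, List.foldl_append]
  simp [PySem.List.enumerate_cons]

-- the last dict maps l[k] to an index ≥ k, and all its relevant values are < l.length
lemma pvL_bounds (l : List Char) (k : Nat) (hk : k < l.length) :
    (k : Int) ≤ (pvL l).getD l[k] 0 ∧ (pvL l).getD l[k] 0 < l.length := by
  induction l using List.reverseRecOn generalizing k with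
  | nil => simp at hk
  | append_singleton l x ih =>
    rw [pvL_snoc]
    rcases Nat.lt_or_ge k l.length with h | h
    · rw [List.getElem_append_left h, PySem.Dict.getD_insert]
      by_cases hx : l[k] = x
      · rw [if_pos hx]
        simp only [List.length_append, List.length_singleton]
        refine ⟨by exact_mod_cast Nat.le_of_lt h, by push_cast; omega⟩
      · rw [if_neg hx]
        rcases ih k h with ⟨h1, h2⟩
        simp only [List.length_append, List.length_singleton]
        refine ⟨h1, by push_cast at h2 ⊢; omega⟩
    · have hk' : k = l.length := by
        simp only [List.length_append, List.length_singleton] at hk; omega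
      subst hk'
      simp only [List.getElem_concat_length]
      rw [PySem.Dict.getD_insert, if_pos rfl]
      simp only [List.length_append, List.length_singleton]
      refine ⟨le_refl _, by push_cast; omega⟩

-- first-dict keys are exactly the chars of l
lemma pvF_contains (l : List Char) (c : Char) : (pvF l).contains c = true ↔ c ∈ l := by
  induction l using List.reverseRecOn generalizing c with
  | nil => simp [pvF, PySem.List.enumerate_nil]
  | append_singleton l x ih =>
    rw [pvF_snoc]
    by_cases h : (pvF l).contains x
    · have hx : x ∈ l := (ih x).mp h
      simp only [if_pos h, ih c, List.mem_append, List.mem_singleton]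
      constructor
      · exact Or.inl
      · rintro (hc | rfl) <;> [exact hc; exact hx]
    · simp only [if_neg h, PySem.Dict.contains_insert]
      simp only [Bool.or_eq_true, beq_iff_eq, ih c, List.mem_append, List.mem_singleton]
      tauto

-- the first dict's items are the first occurrences, in position order
lemma pvF_items (l : List Char) :
    (pvF l).items = (PySem.List.enumerate l 0).filterMap
      (fun p => if p.2 ∈ l.take p.1.toNat then none else some (p.2, p.1)) := by
  induction l using List.reverseRecOn with
  | nil => simp [pvF, PySem.List.enumerate_nil, PySem.Dict.empty]
  | append_singleton l x ih =>
    rw [pvF_snoc, PySem.List.enumerate_append, List.filterMap_append]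
    have hcongr : (PySem.List.enumerate l 0).filterMap
        (fun p => if p.2 ∈ (l ++ [x]).take p.1.toNat then none else some (p.2, p.1)) =
        (PySem.List.enumerate l 0).filterMap
        (fun p => if p.2 ∈ l.take p.1.toNat then none else some (p.2, p.1)) := by
      apply List.filterMap_congr
      intro p hp
      rcases (PySem.List.mem_enumerate_iff _ _ _).mp hp with ⟨j, hj, rfl⟩
      have : ((0 + (j : Int))).toNat = j := by omega
      rw [this, List.take_append_of_le_length (Nat.le_of_lt hj)]
    have hsingle : PySem.List.enumerate [x] (0 + (l.length : Int)) =
        [((l.length : Int), x)] := by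
      simp [PySem.List.enumerate_cons]
    rw [hsingle, hcongr, ← ih]
    by_cases h : (pvF l).contains x
    · have hx : x ∈ l := (pvF_contains l x).mp h
      simp [if_pos h, hx]
    · have hx : ¬ x ∈ l := fun hc => h ((pvF_contains l x).mpr hc)
      rw [if_neg h, PySem.Dict.items_insert_of_not_contains _ _ (by simpa using h)]
      simp [hx]

lemma pvA_eq (s : String) :
    partitionLevels s =
      ((PySem.List.enumerate s.toList 0).foldl (pvStepA (pvL s.toList)) (0, 0, [])).2.2 := by
  unfold partitionLevels pvL pvStepA
  rw [PySem.List.enumerate_eq_map_pyRange s.toList ' ', List.foldl_map, List.foldl_map]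
  rfl

lemma pvB_eq (s : String) :
    partitionLevels_alt s =
      pvFlush ((PySem.List.enumerate s.toList 0).foldl (pvStepB' s.toList (pvL s.toList))
        (none, [])) := by
  unfold partitionLevels_alt
  rw [PySem.List.foldl_prod_mk (fun d (ic : Int × Char) =>
        if PySem.Dict.contains d ic.2 then d else d.insert ic.2 ic.1)
      (fun d (ic : Int × Char) => PySem.Dict.insert d ic.2 ic.1)]
  show pvFlush (((pvF s.toList).items).foldl (pvStepB (pvL s.toList)) (none, [])) = _
  rw [pvF_items, pv_foldl_filterMap]
  congr 1
  apply PySem.List.foldl_congr_mem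
  intro acc p _
  by_cases h : p.2 ∈ s.toList.take p.1.toNat <;> simp [h, pvStepB']

-- the joint loop invariant: after k positions, A's state and B's state describe the
-- same merged chunks (B holds the current chunk open; A has already flushed at a cut)
lemma pvMain (l : List Char) :
    ∀ (m : List Char) (k : Nat), l.drop k = m →
    ∀ (SA : Int × Int × List Int) (SB : Option (Int × Int) × List Int)
      (cs e : Int) (r : List Int),
    (∀ (j : Nat) (_hjk : j < k) (hjl : j < l.length), (pvL l).getD l[j] 0 ≤ e) →
    ((k = 0 ∧ SA = (0, 0, []) ∧ SB = (none, []) ∧ e = 0) ∨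
     ((k : Int) = e + 1 ∧ 1 ≤ k ∧ e < l.length ∧
        SA = ((k : Int), e, r ++ [(k : Int) - cs]) ∧ SB = (some (cs, e), r)) ∨
     (1 ≤ k ∧ (k : Int) ≤ e ∧ e < l.length ∧
        SA = (cs, e, r) ∧ SB = (some (cs, e), r))) →
    ((PySem.List.enumerate m (k : Int)).foldl (pvStepA (pvL l)) SA).2.2 =
      pvFlush ((PySem.List.enumerate m (k : Int)).foldl (pvStepB' l (pvL l)) SB) := by
  intro m
  induction m with
  | nil =>
    intro k hdrop SA SB cs e r hprev hcase
    simp only [PySem.List.enumerate_nil, List.foldl_nil]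
    rcases hcase with ⟨_, hSA, hSB, _⟩ | ⟨hke, _, _, hSA, hSB⟩ | ⟨_, hke, hen, _, _⟩
    · subst hSA hSB; rfl
    · subst hSA hSB
      simp only [pvFlush]
      have : (k : Int) - cs = e - cs + 1 := by omega
      rw [this]
    · exfalso
      have hlen : l.length ≤ k := List.drop_eq_nil_iff.mp hdrop
      omega
  | cons c m' ih =>
    intro k hdrop SA SB cs e r hprev hcase
    have hk : k < l.length := by
      by_contra hge
      rw [List.drop_eq_nil_of_le (Nat.le_of_not_lt hge)] at hdrop
      exact List.cons_ne_nil _ _ hdrop.symm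
    have hcons := List.drop_eq_getElem_cons hk
    rw [hdrop] at hcons
    injection hcons with hlk hdrop'
    obtain ⟨hfc1, hfc2⟩ := pvL_bounds l k hk
    rw [← hlk] at hfc1 hfc2
    have hcast : ((k + 1 : Nat) : Int) = (k : Int) + 1 := by push_cast; ring
    rw [PySem.List.enumerate_cons, List.foldl_cons, List.foldl_cons]
    rcases hcase with ⟨hk0, hSA, hSB, he0⟩ | ⟨hke, hk1, hen, hSA, hSB⟩ |
      ⟨hk1, hke, hen, hSA, hSB⟩
    · -- initial state: k = 0, nothing processed yet
      subst hk0 hSA hSB he0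
      simp only [Nat.cast_zero]
      have hA : pvStepA (pvL l) (0, 0, []) ((0 : Int), c) =
          (if (0 : Int) == (pvL l).getD c 0 then
            ((0 : Int) + 1, (pvL l).getD c 0, ([] : List Int) ++ [0 - 0 + 1])
          else (0, (pvL l).getD c 0, [])) := by
        simp only [pvStepA]
        have : max (0 : Int) ((pvL l).getD c 0) = (pvL l).getD c 0 := by
          simp at hfc1; omega
        rw [this]
      have hB : pvStepB' l (pvL l) (none, []) ((0 : Int), c) =
          (some ((0 : Int), (pvL l).getD c 0), []) := by
        simp only [pvStepB', pvStepB]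
        rw [if_neg (by simp)]
      rw [hA, hB]
      have hprev' : ∀ (j : Nat), j < 0 + 1 → ∀ (hjl : j < l.length),
          (pvL l).getD l[j] 0 ≤ (pvL l).getD c 0 := by
        intro j hj hjl
        have : j = 0 := by omega
        subst this
        rw [hlk]
      by_cases h0 : (0 : Int) = (pvL l).getD c 0
      · rw [if_pos (by exact beq_iff_eq.mpr h0)]
        have := ih 1 hdrop'.symm ((0 : Int) + 1, (pvL l).getD c 0, [0 - 0 + 1])
          (some ((0 : Int), (pvL l).getD c 0), []) 0 ((pvL l).getD c 0) []
          (fun j hj hjl => hprev' j hj hjl)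
          (Or.inr (Or.inl ⟨by omega, le_refl 1, by exact_mod_cast hfc2,
            by norm_num, rfl⟩))
        simpa using this
      · rw [if_neg (by simpa using h0)]
        have h1 : (1 : Int) ≤ (pvL l).getD c 0 := by simp at hfc1; omega
        have := ih 1 hdrop'.symm ((0 : Int), (pvL l).getD c 0, [])
          (some ((0 : Int), (pvL l).getD c 0), []) 0 ((pvL l).getD c 0) []
          (fun j hj hjl => hprev' j hj hjl)
          (Or.inr (Or.inr ⟨le_refl 1, by exact_mod_cast h1, by exact_mod_cast hfc2,
            rfl, rfl⟩))
        simpa using this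
    · -- boundary: A has just cut at k-1; c must be a first occurrence
      subst hSA hSB
      have hfirst : ¬ c ∈ l.take k := by
        intro hmem
        obtain ⟨j, hj, hlj⟩ := List.mem_take_iff_getElem.mp hmem
        have hjk : j < k := lt_of_lt_of_le hj (min_le_left _ _)
        have hjl : j < l.length := lt_of_lt_of_le hj (min_le_right _ _)
        have := hprev j hjk hjl
        rw [hlj] at this
        omega
      have hA : pvStepA (pvL l) ((k : Int), e, r ++ [(k : Int) - cs]) (((k : Nat) : Int), c) =
          (if ((k : Int)) == (pvL l).getD c 0 then
            ((k : Int) + 1, (pvL l).getD c 0, (r ++ [(k : Int) - cs]) ++ [(k : Int) - (k : Int) + 1])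
          else ((k : Int), (pvL l).getD c 0, r ++ [(k : Int) - cs])) := by
        simp only [pvStepA]
        have : max e ((pvL l).getD c 0) = (pvL l).getD c 0 :=
          max_eq_right (by omega)
        rw [this]
      have hB : pvStepB' l (pvL l) (some (cs, e), r) (((k : Nat) : Int), c) =
          (some ((k : Int), (pvL l).getD c 0), r ++ [e - cs + 1]) := by
        simp only [pvStepB', pvStepB]
        rw [Int.toNat_natCast, if_neg hfirst]
        rw [if_neg (by omega)]
      rw [hA, hB]
      have hreq : r ++ [e - cs + 1] = r ++ [(k : Int) - cs] := by
        have : e - cs + 1 = (k : Int) - cs := by omega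
        rw [this]
      rw [hreq]
      have hprev' : ∀ (j : Nat), j < k + 1 → ∀ (hjl : j < l.length),
          (pvL l).getD l[j] 0 ≤ (pvL l).getD c 0 := by
        intro j hj hjl
        rcases Nat.lt_or_ge j k with hjk | hjk
        · have := hprev j hjk hjl
          omega
        · have : j = k := by omega
          subst this
          rw [hlk]
      by_cases h0 : ((k : Int)) = (pvL l).getD c 0
      · rw [if_pos (by exact beq_iff_eq.mpr h0)]
        have := ih (k + 1) hdrop'.symm
          ((k : Int) + 1, (pvL l).getD c 0, (r ++ [(k : Int) - cs]) ++ [(k : Int) - (k : Int) + 1])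
          (some ((k : Int), (pvL l).getD c 0), r ++ [(k : Int) - cs])
          (k : Int) ((pvL l).getD c 0) (r ++ [(k : Int) - cs])
          (fun j hj hjl => hprev' j hj hjl)
          (Or.inr (Or.inl ⟨by omega, by omega, by exact_mod_cast hfc2,
            by rw [hcast]; have h9 : (k : Int) + 1 - (k : Int) = (k : Int) - (k : Int) + 1 := by ring
               rw [h9], rfl⟩))
        rw [hcast] at this
        exact this
      · rw [if_neg (by simpa using h0)]
        have := ih (k + 1) hdrop'.symm
          ((k : Int), (pvL l).getD c 0, r ++ [(k : Int) - cs])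
          (some ((k : Int), (pvL l).getD c 0), r ++ [(k : Int) - cs])
          (k : Int) ((pvL l).getD c 0) (r ++ [(k : Int) - cs])
          (fun j hj hjl => hprev' j hj hjl)
          (Or.inr (Or.inr ⟨by omega, by omega, by exact_mod_cast hfc2, rfl, rfl⟩))
        rw [hcast] at this
        exact this
    · -- middle of a chunk
      subst hSA hSB
      have hA : pvStepA (pvL l) (cs, e, r) (((k : Nat) : Int), c) =
          (if ((k : Int)) == max e ((pvL l).getD c 0) then
            ((k : Int) + 1, max e ((pvL l).getD c 0), r ++ [(k : Int) - cs + 1])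
          else (cs, max e ((pvL l).getD c 0), r)) := by
        simp only [pvStepA]
      have hB : pvStepB' l (pvL l) (some (cs, e), r) (((k : Nat) : Int), c) =
          (some (cs, max e ((pvL l).getD c 0)), r) := by
        simp only [pvStepB', pvStepB]
        rw [Int.toNat_natCast]
        by_cases hmem : c ∈ l.take k
        · rw [if_pos hmem]
          -- non-first occurrence: its last value is already folded into e
          obtain ⟨j, hj, hlj⟩ := List.mem_take_iff_getElem.mp hmem
          have hjk : j < k := lt_of_lt_of_le hj (min_le_left _ _)
          have hjl : j < l.length := lt_of_lt_of_le hj (min_le_right _ _)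
          have hfle := hprev j hjk hjl
          rw [hlj] at hfle
          have : max e ((pvL l).getD c 0) = e := max_eq_left (by omega)
          rw [this]
        · rw [if_neg hmem]
          rw [if_pos (by omega)]
      rw [hA, hB]
      have hprev' : ∀ (j : Nat), j < k + 1 → ∀ (hjl : j < l.length),
          (pvL l).getD l[j] 0 ≤ max e ((pvL l).getD c 0) := by
        intro j hj hjl
        rcases Nat.lt_or_ge j k with hjk | hjk
        · exact le_trans (hprev j hjk hjl) (le_max_left _ _)
        · have : j = k := by omega
          subst this
          rw [hlk]
          exact le_max_right _ _
      have hmaxlt : max e ((pvL l).getD c 0) < (l.length : Int) := max_lt hen hfc2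
      by_cases h0 : ((k : Int)) = max e ((pvL l).getD c 0)
      · rw [if_pos (by exact beq_iff_eq.mpr h0)]
        have := ih (k + 1) hdrop'.symm
          ((k : Int) + 1, max e ((pvL l).getD c 0), r ++ [(k : Int) - cs + 1])
          (some (cs, max e ((pvL l).getD c 0)), r)
          cs (max e ((pvL l).getD c 0)) r
          (fun j hj hjl => hprev' j hj hjl)
          (Or.inr (Or.inl ⟨by omega, by omega, hmaxlt,
            by rw [hcast]; have h9 : (k : Int) + 1 - cs = (k : Int) - cs + 1 := by ring
               rw [h9], rfl⟩))
        rw [hcast] at this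
        exact this
      · rw [if_neg (by simpa using h0)]
        have := ih (k + 1) hdrop'.symm
          (cs, max e ((pvL l).getD c 0), r)
          (some (cs, max e ((pvL l).getD c 0)), r)
          cs (max e ((pvL l).getD c 0)) r
          (fun j hj hjl => hprev' j hj hjl)
          (Or.inr (Or.inr ⟨by omega, by omega, hmaxlt, rfl, rfl⟩))
        rw [hcast] at this
        exact this

-- ===== VERDICT (by name: the statement is the Claim_ definition above) =====
theorem partitionLevels_spec : Claim_equal_partitionLevels := by
  intro s _
  unfold Spec_partitionLevels
  rw [pvA_eq, pvB_eq]
  exact pvMain s.toList s.toList 0 rfl _ _ 0 0 []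
    (fun j hj _ => absurd hj (Nat.not_lt_zero j))
    (Or.inl ⟨rfl, rfl, rfl, rfl⟩)
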